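-- pv_equiv track=rewrite | github.com/takeny1998/algorithm-problem | baekjoon/p23201.py | step_six
-- ===== SOURCE A (Python) =====
-- def step_six(arr):
--     pivot = len(arr) // 2
--     result = []
--
--     # 첫번째 접기
--     left_arr = arr[:pivot]
--     right_arr = arr[pivot:]
--     arr = []
--     left_arr.reverse()
--     arr.append(left_arr)
--     arr.append(right_arr)
--
--     pivot = len(arr[0]) // 2
--     # 두번째 접기
--     divide = []
--     remain = []
--
--     for i in range(len(arr)):
--         left_arr = arr[i][:pivot]
--         right_arr = arr[i][pivot:]
--
--         divide.append(left_arr)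
--         remain.append(right_arr)
--
--     divide.reverse()
--     for pair in divide:
--         pair.reverse()
--         result.append(pair)
--
--     for pair in remain:
--         result.append(pair)
--
--     return result
-- ===== SOURCE B (Python) =====
-- def step_six(arr):
--     p1 = len(arr) // 2
--     p2 = p1 // 2
--     return [arr[p1:p1 + p2][::-1], arr[p1 - p2:p1], arr[:p1 - p2][::-1], arr[p1 + p2:]]
-- ===== Notes on version B (the rewrite author's own statement) =====
-- stated objective: simpler
-- what changed: Replaces A's two-stage fold (build [reversed-left, right], loop both halves into divide/remain buffers, reverse and re-emit) with index arithmetic: the four output chunks are returned directly as slices of the input, two of them reversed.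
import Mathlib
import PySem

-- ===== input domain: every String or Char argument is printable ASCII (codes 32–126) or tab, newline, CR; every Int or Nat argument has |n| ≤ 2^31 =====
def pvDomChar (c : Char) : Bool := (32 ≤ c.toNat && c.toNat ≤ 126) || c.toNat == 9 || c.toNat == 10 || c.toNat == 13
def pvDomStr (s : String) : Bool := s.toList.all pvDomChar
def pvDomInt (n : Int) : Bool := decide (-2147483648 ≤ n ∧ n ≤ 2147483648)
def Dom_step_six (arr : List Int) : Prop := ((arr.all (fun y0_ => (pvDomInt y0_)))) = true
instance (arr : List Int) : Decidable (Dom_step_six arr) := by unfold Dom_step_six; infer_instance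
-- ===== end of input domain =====

-- B replaces A's two-stage fold loop and its divide/remain buffers with four direct slices (simpler decomposition).

-- ===== PORT A =====
-- literal transliteration of A: first fold (halve, reverse left), then a loop slicing
-- each half at its midpoint into divide/remain buffers, then reverse-and-emit.
def step_six (arr : List Int) : List (List Int) :=
  let pivot := PySem.Int.floordiv (arr.length : Int) 2
  let left_arr := PySem.List.slice arr none (some pivot)
  let right_arr := PySem.List.slice arr (some pivot) none
  let left_arr := left_arr.reverse
  let arr2 : List (List Int) := [left_arr, right_arr]
  let pivot2 := PySem.Int.floordiv ((PySem.List.pyGetD arr2 0 []).length : Int) 2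
  let dr := (PySem.List.pyRange 0 (arr2.length : Int) 1).foldl
      (fun (dr : List (List Int) × List (List Int)) i =>
        let row := PySem.List.pyGetD arr2 i []
        (dr.1 ++ [PySem.List.slice row none (some pivot2)],
         dr.2 ++ [PySem.List.slice row (some pivot2) none])) ([], [])
  let divide := dr.1.reverse
  let result := divide.foldl (fun res pair => res ++ [pair.reverse]) []
  let result := dr.2.foldl (fun res pair => res ++ [pair]) result
  result
-- ===== PORT B =====
def step_six_alt (arr : List Int) : List (List Int) :=
  let p1 := PySem.Int.floordiv (arr.length : Int) 2
  let p2 := PySem.Int.floordiv p1 2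
  [(PySem.List.slice arr (some p1) (some (p1 + p2))).reverse,
   PySem.List.slice arr (some (p1 - p2)) (some p1),
   (PySem.List.slice arr none (some (p1 - p2))).reverse,
   PySem.List.slice arr (some (p1 + p2)) none]

-- ===== PRECONDITION & SPEC =====
def Spec_step_six (arr : List Int) (out : List (List Int)) : Prop := out = step_six_alt arr
instance (arr : List Int) (out : List (List Int)) : Decidable (Spec_step_six arr out) := by unfold Spec_step_six; infer_instance

-- ===== CLAIM =====
def Claim_equal_step_six : Prop := ∀ (arr : List Int), Dom_step_six arr → Spec_step_six arr (step_six arr)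

-- ===== LEMMAS AND PROOFS =====

-- The heart of the equivalence: A's staged fold equals B's four direct slices.
theorem key (arr : List Int) : step_six arr = step_six_alt arr := by
  have hp : PySem.Int.floordiv (arr.length : Int) 2 = ((arr.length/2 : Nat) : Int) := by
    exact_mod_cast PySem.Int.floordiv_natCast arr.length 2
  set p := arr.length / 2 with hpdef
  have hpn : p ≤ arr.length := Nat.div_le_self _ _
  set q := p / 2 with hqdef
  have hqp : q ≤ p := Nat.div_le_self _ _
  have hq : PySem.Int.floordiv (p : Int) 2 = ((q : Nat) : Int) := by
    exact_mod_cast PySem.Int.floordiv_natCast p 2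
  have hrange : PySem.List.pyRange 0 2 1 = [0, 1] := by decide
  simp only [step_six, step_six_alt, hp, PySem.List.slice_to_natCast,
    PySem.List.slice_from_natCast, PySem.List.pyGetD_zero_cons, List.length_reverse,
    List.length_take, Nat.min_eq_left hpn, hq, List.length_cons, List.length_nil]
  norm_num [hrange, List.foldl, PySem.List.pyGetD, PySem.List.pyGet?, PySem.List.pyIdx?]
  have hc1 : ((p : Int) + (q : Int)) = ((p + q : Nat) : Int) := by push_cast; ring
  have hc2 : ((p : Int) - (q : Int)) = ((p - q : Nat) : Int) := by
    push_cast [Nat.cast_sub hqp]; ring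
  simp only [hc1, hc2, PySem.List.slice_natCast, PySem.List.slice_to_natCast,
    PySem.List.slice_from_natCast, List.take_reverse, List.drop_reverse,
    List.length_take, Nat.min_eq_left hpn, List.reverse_reverse,
    List.drop_take, List.take_take]
  refine ⟨?_, trivial, ?_, trivial⟩
  · congr 1; omega
  · rw [Nat.min_eq_left (by omega : p - q ≤ p)]

-- ===== VERDICT =====
theorem step_six_spec : Claim_equal_step_six := fun arr _ => key arr
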